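-- pv_equiv track=rewrite | github.com/tripura-kant/Python-Scripting | scaler/array/6.PY | min_time_to_equal_elements
-- ===== SOURCE A (Python) =====
-- def min_time_to_equal_elements(A):
--     max_value = A[0]
--     for num in A:
--         if num > max_value:
--             max_value = num
--
--     total_time = 0
--     for num in A:
--         total_time += max_value - num
--     return total_time
-- ===== SOURCE B (Python) =====
-- def min_time_to_equal_elements(A):
--     # Online backward scan: maintain the answer for the suffix processed so far.
--     # State: m = max of processed suffix, t = answer for it, c = its size.
--     # A new maximum x raises every processed element's target, so the whole
--     # accumulated answer is rebalanced by c * (x - m).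
--     m = A[len(A) - 1]
--     t = 0
--     c = 1
--     for i in range(len(A) - 2, -1, -1):
--         x = A[i]
--         if x > m:
--             t += c * (x - m)
--             m = x
--         else:
--             t += m - x
--         c += 1
--     return t
-- ===== Notes on version B (the rewrite author's own statement) =====
-- stated objective: alternative
-- what changed: B is an online backward scan that carries the answer itself: it keeps (suffix max m, suffix answer t, suffix size c) and, when a new maximum x arrives, rebalances the accumulated answer by c*(x-m); it never runs A's two forward passes and never forms a max-then-subtract loop.
import Mathlib
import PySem

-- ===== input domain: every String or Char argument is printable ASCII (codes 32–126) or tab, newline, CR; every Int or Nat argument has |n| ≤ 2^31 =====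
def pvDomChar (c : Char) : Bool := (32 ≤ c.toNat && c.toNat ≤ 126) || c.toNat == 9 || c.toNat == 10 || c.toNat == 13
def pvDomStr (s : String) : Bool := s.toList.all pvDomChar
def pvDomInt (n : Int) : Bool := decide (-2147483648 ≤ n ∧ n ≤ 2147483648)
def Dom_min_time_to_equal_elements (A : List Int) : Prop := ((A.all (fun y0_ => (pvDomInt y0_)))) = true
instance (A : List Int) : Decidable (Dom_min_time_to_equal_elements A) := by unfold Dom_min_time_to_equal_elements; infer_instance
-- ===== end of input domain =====

-- B replaces A's two forward passes by one online backward scan that maintains the answer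
-- incrementally, rebalancing it by count*(x-m) whenever a new maximum appears; objective: alternative.

-- ===== PORT A =====
-- A: first loop finds the maximum seeded with A[0]; second loop sums (max - num).
def min_time_to_equal_elements (A : List Int) : Int :=
  match A with
  | [] => 0  -- indexing the first element raises IndexError here; excluded by Pre_
  | a0 :: _ =>
    let max_value := A.foldl (fun m num => if num > m then num else m) a0
    A.foldl (fun t num => t + (max_value - num)) 0

-- ===== PORT B =====
-- B: backward loop 'for i in range(len(A)-2, -1, -1)' over state (m, t, c), i.e. a fold over
-- the reversed prefix A[:-1]; seed m = A[len(A)-1].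
def min_time_to_equal_elements_alt (A : List Int) : Int :=
  match A.getLast? with
  | none => 0  -- indexing the last element raises IndexError here; excluded by Pre_
  | some last =>
    let s := (A.dropLast).reverse.foldl
      (fun (s : Int × Int × Int) x =>
        if x > s.1 then (x, s.2.1 + s.2.2 * (x - s.1), s.2.2 + 1)
        else (s.1, s.2.1 + (s.1 - x), s.2.2 + 1)) (last, 0, 1)
    s.2.1

-- ===== PRECONDITION & SPEC =====
-- Pre_ excludes only the empty list, on which both A and B raise IndexError when reading an element.
def Pre_min_time_to_equal_elements (A : List Int) : Prop := A ≠ []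
instance (A : List Int) : Decidable (Pre_min_time_to_equal_elements A) := by
  unfold Pre_min_time_to_equal_elements; infer_instance

def pvWitness_min_time_to_equal_elements : List Int := [3, 1, 2]

def Spec_min_time_to_equal_elements (A : List Int) (out : Int) : Prop := out = min_time_to_equal_elements_alt A
instance (A : List Int) (out : Int) : Decidable (Spec_min_time_to_equal_elements A out) := by unfold Spec_min_time_to_equal_elements; infer_instance

-- ===== CLAIM (what is proved, stated in full; the proofs are below) =====
def Claim_equal_min_time_to_equal_elements : Prop := ∀ (A : List Int), Dom_min_time_to_equal_elements A → Pre_min_time_to_equal_elements A → Spec_min_time_to_equal_elements A (min_time_to_equal_elements A)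

-- ===== LEMMAS AND PROOFS =====

-- A's max-update step is the lattice max.
theorem pv_step_eq : (fun (m num : Int) => if num > m then num else m) = (· ⊔ ·) := by
  funext m num
  simp only [max_def]
  split <;> split <;> omega

-- pull a sup out of the seed of a max-fold
theorem pv_sup_foldl (l : List Int) (a b : Int) :
    l.foldl (· ⊔ ·) (a ⊔ b) = a ⊔ l.foldl (· ⊔ ·) b := by
  induction l generalizing b with
  | nil => simp
  | cons x xs ih => simpa [List.foldl_cons, sup_assoc] using ih (b ⊔ x)

-- a max-fold ignores reversal
theorem pv_foldl_sup_reverse (l : List Int) (s : Int) :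
    l.reverse.foldl (· ⊔ ·) s = l.foldl (· ⊔ ·) s := by
  induction l generalizing s with
  | nil => rfl
  | cons x xs ih =>
    have h : s ⊔ x = x ⊔ s := sup_comm s x
    simp [List.foldl_append, ih, List.foldl_cons, h, pv_sup_foldl, sup_comm]

-- A's difference-accumulation loop in closed form.
theorem pv_diff_fold (A : List Int) (m t : Int) :
    A.foldl (fun t num => t + (m - num)) t = t + (A.length : Int) * m - A.sum := by
  induction A generalizing t with
  | nil => simp
  | cons x xs ih => simp [List.foldl_cons, ih]; ring

-- B's rebalancing fold in closed form: final state over any list l from (m, t, c).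
theorem pv_alt_fold (l : List Int) (m t c : Int) :
    l.foldl
      (fun (s : Int × Int × Int) x =>
        if x > s.1 then (x, s.2.1 + s.2.2 * (x - s.1), s.2.2 + 1)
        else (s.1, s.2.1 + (s.1 - x), s.2.2 + 1)) (m, t, c)
    = (l.foldl (· ⊔ ·) m,
       t + c * (l.foldl (· ⊔ ·) m - m) + (l.length : Int) * l.foldl (· ⊔ ·) m - l.sum,
       c + l.length) := by
  induction l generalizing m t c with
  | nil => simp
  | cons x xs ih =>
    simp only [List.foldl_cons]
    split
    · rename_i h
      have hm : m ⊔ x = x := sup_eq_right.mpr (le_of_lt h)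
      rw [ih, hm]
      refine Prod.ext ?_ (Prod.ext ?_ ?_) <;> simp <;> ring
    · rename_i h
      have hm : m ⊔ x = m := sup_eq_left.mpr (by omega)
      rw [ih, hm]
      refine Prod.ext ?_ (Prod.ext ?_ ?_) <;> simp <;> ring

-- ===== VERDICT (by name: the statement is the Claim_ definition above) =====
theorem min_time_to_equal_elements_spec : Claim_equal_min_time_to_equal_elements := by
  intro A _ hpre
  unfold Spec_min_time_to_equal_elements
  match hA : A with
  | [] => exact absurd rfl hpre
  | a0 :: rest =>
    have hgl : (a0 :: rest).getLast? = some ((a0 :: rest).getLast (by simp)) :=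
      List.getLast?_eq_some_getLast _
    set y := (a0 :: rest).getLast (by simp) with hy
    have hsplit : a0 :: rest = (a0 :: rest).dropLast ++ [y] :=
      (List.dropLast_concat_getLast (l := a0 :: rest) (by simp)).symm
    simp only [min_time_to_equal_elements, min_time_to_equal_elements_alt, hgl,
      pv_step_eq, pv_diff_fold, pv_alt_fold, pv_foldl_sup_reverse, Int.zero_add,
      List.length_reverse, List.sum_reverse]
    -- both sides now mention max-folds; relate the two seeds/lists
    cases hr : rest with
    | nil =>
      have : y = a0 := by simp [hy, hr]
      simp [this]
    | cons r rs =>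
      -- dropLast (a0 :: r :: rs) = a0 :: dropLast (r :: rs)
      have hdl : (a0 :: r :: rs).dropLast = a0 :: (r :: rs).dropLast := by simp
      have hsplit' : a0 :: r :: rs = (a0 :: (r :: rs).dropLast) ++ [y] := by
        rw [← hdl]; exact hr ▸ hsplit
      -- maxima agree
      have hmax : (a0 :: (r :: rs).dropLast).foldl (· ⊔ ·) y
          = ((a0 :: (r :: rs).dropLast) ++ [y]).foldl (· ⊔ ·) a0 := by
        simp only [List.foldl_append, List.foldl_cons, List.foldl_nil, max_self]
        rw [pv_sup_foldl _ y a0, sup_comm]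
      rw [hr] at *
      rw [hdl]
      rw [hmax, ← hsplit']
      -- arithmetic: lengths and sums via the split
      have hlen : ((a0 :: r :: rs).length : Int)
          = ((a0 :: (r :: rs).dropLast).length : Int) + 1 := by
        rw [hsplit']; simp
      have hsum : (a0 :: r :: rs).sum = (a0 :: (r :: rs).dropLast).sum + y := by
        conv_lhs => rw [hsplit']
        simp
        omega
      rw [hlen, hsum]
      ring
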